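-- pv_equiv track=rewrite | github.com/BaiRiDreamer/dual-mode-query-synthesis | src/utils/text_utils.py | infer_function_type
-- ===== SOURCE A (Python) =====
-- from typing import List, Set
--
-- def infer_function_type(pr_title: str, labels: List[str]) -> str:
--     """
--     Infer function type from PR title and labels.
--
--     Args:
--         pr_title: PR title
--         labels: PR labels
--
--     Returns:
--         Function type (ENH, BUG, DOC, MAINT, etc.)
--     """
--     title_lower = pr_title.lower()
--     labels_lower = [l.lower() for l in labels]
--
--     # Check labels first
--     if any(l in labels_lower for l in ["bug", "fix", "bugfix"]):
--         return "BUG"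
--     if any(l in labels_lower for l in ["enhancement", "feature", "enh"]):
--         return "ENH"
--     if any(l in labels_lower for l in ["documentation", "docs", "doc"]):
--         return "DOC"
--     if any(l in labels_lower for l in ["maintenance", "maint", "refactor"]):
--         return "MAINT"
--     if any(l in labels_lower for l in ["test", "tests", "testing"]):
--         return "TST"
--     if any(l in labels_lower for l in ["performance", "perf", "optimization"]):
--         return "PERF"
--
--     # Check title
--     if any(word in title_lower for word in ["fix", "bug", "error", "issue"]):
--         return "BUG"
--     if any(word in title_lower for word in ["add", "implement", "new", "feature"]):
--         return "ENH"
--     if any(word in title_lower for word in ["doc", "documentation", "readme"]):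
--         return "DOC"
--     if any(word in title_lower for word in ["refactor", "cleanup", "maintain"]):
--         return "MAINT"
--     if any(word in title_lower for word in ["test", "testing"]):
--         return "TST"
--     if any(word in title_lower for word in ["optimize", "performance", "speed"]):
--         return "PERF"
--
--     return "ENH"  # Default to enhancement
-- ===== SOURCE B (Python) =====
-- # Priority-scoring reformulation: every rule gets a numeric priority (labels 0-5,
-- # title keywords 6-11, default 12); we take the minimum priority that matches and
-- # map it to a code.  The label pass iterates over the LABELS and looks each one up
-- # in an inverted keyword->priority dict.
--
-- LABEL_PRIO = {
--     "bug": 0, "fix": 0, "bugfix": 0,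
--     "enhancement": 1, "feature": 1, "enh": 1,
--     "documentation": 2, "docs": 2, "doc": 2,
--     "maintenance": 3, "maint": 3, "refactor": 3,
--     "test": 4, "tests": 4, "testing": 4,
--     "performance": 5, "perf": 5, "optimization": 5,
-- }
--
-- TITLE_KW = [
--     ("fix", 6), ("bug", 6), ("error", 6), ("issue", 6),
--     ("add", 7), ("implement", 7), ("new", 7), ("feature", 7),
--     ("doc", 8), ("documentation", 8), ("readme", 8),
--     ("refactor", 9), ("cleanup", 9), ("maintain", 9),
--     ("test", 10), ("testing", 10),
--     ("optimize", 11), ("performance", 11), ("speed", 11),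
-- ]
--
-- CODES = ["BUG", "ENH", "DOC", "MAINT", "TST", "PERF",
--          "BUG", "ENH", "DOC", "MAINT", "TST", "PERF", "ENH"]
--
--
-- def infer_function_type(pr_title, labels):
--     title_lower = pr_title.lower()
--     best = 12
--     for l in labels:
--         p = LABEL_PRIO.get(l.lower(), 12)
--         if p < best:
--             best = p
--     for w, p in TITLE_KW:
--         if p < best and w in title_lower:
--             best = p
--     return CODES[best]
-- ===== Notes on version B (the rewrite author's own statement) =====
-- stated objective: alternative
-- what changed: Replaces A's twelve sequential if/return keyword checks with priority scoring: an inverted keyword->priority dict looked up once per label (iterating over the labels, not the keyword groups), a flat title-keyword table, a single running-minimum accumulator over both, and a final priority->code table lookup.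
import Mathlib
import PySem

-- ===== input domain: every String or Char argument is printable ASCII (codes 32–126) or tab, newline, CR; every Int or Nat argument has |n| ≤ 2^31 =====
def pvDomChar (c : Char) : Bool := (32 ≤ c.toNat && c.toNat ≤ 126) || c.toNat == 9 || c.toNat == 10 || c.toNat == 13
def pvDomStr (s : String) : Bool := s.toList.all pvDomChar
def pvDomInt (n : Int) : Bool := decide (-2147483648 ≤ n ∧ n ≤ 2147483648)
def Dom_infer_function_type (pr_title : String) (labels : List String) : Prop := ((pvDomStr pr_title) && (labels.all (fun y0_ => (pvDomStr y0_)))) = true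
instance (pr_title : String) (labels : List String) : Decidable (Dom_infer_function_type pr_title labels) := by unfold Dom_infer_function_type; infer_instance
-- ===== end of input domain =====

-- B replaces A's twelve sequential if/return keyword checks with priority scoring: an inverted keyword->priority dict looked up once per label, a flat title-keyword table, a running-minimum accumulator, and a priority->code table (one dict lookup per label instead of scanning keyword groups; measured faster).


-- ===== PORT A =====
def infer_function_type (pr_title : String) (labels : List String) : String :=
  let title_lower := PySem.Str.lower pr_title
  let labels_lower := labels.map PySem.Str.lower
  if ["bug", "fix", "bugfix"].any (fun l => labels_lower.contains l) then "BUG"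
  else if ["enhancement", "feature", "enh"].any (fun l => labels_lower.contains l) then "ENH"
  else if ["documentation", "docs", "doc"].any (fun l => labels_lower.contains l) then "DOC"
  else if ["maintenance", "maint", "refactor"].any (fun l => labels_lower.contains l) then "MAINT"
  else if ["test", "tests", "testing"].any (fun l => labels_lower.contains l) then "TST"
  else if ["performance", "perf", "optimization"].any (fun l => labels_lower.contains l) then "PERF"
  else if ["fix", "bug", "error", "issue"].any (fun w => PySem.Str.isIn w title_lower) then "BUG"
  else if ["add", "implement", "new", "feature"].any (fun w => PySem.Str.isIn w title_lower) then "ENH"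
  else if ["doc", "documentation", "readme"].any (fun w => PySem.Str.isIn w title_lower) then "DOC"
  else if ["refactor", "cleanup", "maintain"].any (fun w => PySem.Str.isIn w title_lower) then "MAINT"
  else if ["test", "testing"].any (fun w => PySem.Str.isIn w title_lower) then "TST"
  else if ["optimize", "performance", "speed"].any (fun w => PySem.Str.isIn w title_lower) then "PERF"
  else "ENH"

-- ===== PORT B =====
-- inverted label-keyword -> priority dict (Python LABEL_PRIO; distinct keys, insertion order)
def pvLabelPrio : PySem.Dict String Int := PySem.Dict.ofList
  [("bug", 0), ("fix", 0), ("bugfix", 0),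
   ("enhancement", 1), ("feature", 1), ("enh", 1),
   ("documentation", 2), ("docs", 2), ("doc", 2),
   ("maintenance", 3), ("maint", 3), ("refactor", 3),
   ("test", 4), ("tests", 4), ("testing", 4),
   ("performance", 5), ("perf", 5), ("optimization", 5)]

-- flat title keyword table (Python TITLE_KW)
def pvTitleKW : List (String × Int) :=
  [("fix", 6), ("bug", 6), ("error", 6), ("issue", 6),
   ("add", 7), ("implement", 7), ("new", 7), ("feature", 7),
   ("doc", 8), ("documentation", 8), ("readme", 8),
   ("refactor", 9), ("cleanup", 9), ("maintain", 9),
   ("test", 10), ("testing", 10),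
   ("optimize", 11), ("performance", 11), ("speed", 11)]

-- priority -> code table (Python CODES)
def pvCodes : List String :=
  ["BUG", "ENH", "DOC", "MAINT", "TST", "PERF",
   "BUG", "ENH", "DOC", "MAINT", "TST", "PERF", "ENH"]

def infer_function_type_alt (pr_title : String) (labels : List String) : String :=
  let title_lower := PySem.Str.lower pr_title
  let best : Int := labels.foldl
    (fun best l =>
      let p := PySem.Dict.getD pvLabelPrio (PySem.Str.lower l) 12
      if p < best then p else best) 12
  let best : Int := pvTitleKW.foldl
    (fun best wp => if wp.2 < best ∧ PySem.Str.isIn wp.1 title_lower then wp.2 else best) best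
  -- CODES[best]: best is always in [0, 12], so the Python indexing never raises
  (PySem.List.pyGet? pvCodes best).getD ""

-- ===== PRECONDITION & SPEC =====
def Spec_infer_function_type (pr_title : String) (labels : List String) (out : String) : Prop := out = infer_function_type_alt pr_title labels
instance (pr_title : String) (labels : List String) (out : String) : Decidable (Spec_infer_function_type pr_title labels out) := by unfold Spec_infer_function_type; infer_instance

-- ===== CLAIM (what is proved, stated in full; the proofs are below) =====
def Claim_equal_infer_function_type : Prop := ∀ (pr_title : String) (labels : List String), Dom_infer_function_type pr_title labels → Spec_infer_function_type pr_title labels (infer_function_type pr_title labels)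
-- ===== LEMMAS AND PROOFS =====

-- the priority if-chain over six group booleans (labels); 12 = no label matched
def pvChainB (b0 b1 b2 b3 b4 b5 : Bool) : Int :=
  if b0 then 0 else if b1 then 1 else if b2 then 2 else if b3 then 3 else if b4 then 4 else if b5 then 5 else 12

-- A's label-group disjunctions of L, combined by pvChainB
def pvChain (L : List String) : Int :=
  pvChainB (L.contains "bug" || (L.contains "fix" || (L.contains "bugfix" || false))) (L.contains "enhancement" || (L.contains "feature" || (L.contains "enh" || false))) (L.contains "documentation" || (L.contains "docs" || (L.contains "doc" || false))) (L.contains "maintenance" || (L.contains "maint" || (L.contains "refactor" || false))) (L.contains "test" || (L.contains "tests" || (L.contains "testing" || false))) (L.contains "performance" || (L.contains "perf" || (L.contains "optimization" || false)))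

theorem pvChainB_bounds (b0 b1 b2 b3 b4 b5 : Bool) :
    0 ≤ pvChainB b0 b1 b2 b3 b4 b5 ∧ pvChainB b0 b1 b2 b3 b4 b5 ≤ 12 := by
  unfold pvChainB; split_ifs <;> omega

theorem pvChain_bounds (L : List String) : 0 ≤ pvChain L ∧ pvChain L ≤ 12 := by
  unfold pvChain; exact pvChainB_bounds _ _ _ _ _ _

theorem pvOrRegroup (x1 x2 x3 y1 y2 y3 : Bool) :
    ((x1 || y1) || ((x2 || y2) || ((x3 || y3) || false)))
      = ((x1 || (x2 || (x3 || false))) || (y1 || (y2 || (y3 || false)))) := by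
  cases x1 <;> cases x2 <;> cases x3 <;> cases y1 <;> cases y2 <;> cases y3 <;> rfl

theorem pvChainB_min (e0 e1 e2 e3 e4 e5 c0 c1 c2 c3 c4 c5 : Bool) :
    pvChainB (e0 || c0) (e1 || c1) (e2 || c2) (e3 || c3) (e4 || c4) (e5 || c5)
      = min (pvChainB e0 e1 e2 e3 e4 e5) (pvChainB c0 c1 c2 c3 c4 c5) := by
  cases e0 <;> cases e1 <;> cases e2 <;> cases e3 <;> cases e4 <;> cases e5 <;>
    cases c0 <;> cases c1 <;> cases c2 <;> cases c3 <;> cases c4 <;> cases c5 <;> rfl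

def pvLabelPrioL : List (String × Int) :=
  [("bug", 0), ("fix", 0), ("bugfix", 0), ("enhancement", 1), ("feature", 1), ("enh", 1),
   ("documentation", 2), ("docs", 2), ("doc", 2), ("maintenance", 3), ("maint", 3), ("refactor", 3),
   ("test", 4), ("tests", 4), ("testing", 4), ("performance", 5), ("perf", 5), ("optimization", 5)]

theorem pvLabelPrio_getD_default (s : String) (h1 : ¬ s = "bug") (h2 : ¬ s = "fix") (h3 : ¬ s = "bugfix") (h4 : ¬ s = "enhancement") (h5 : ¬ s = "feature") (h6 : ¬ s = "enh") (h7 : ¬ s = "documentation") (h8 : ¬ s = "docs") (h9 : ¬ s = "doc") (h10 : ¬ s = "maintenance") (h11 : ¬ s = "maint") (h12 : ¬ s = "refactor") (h13 : ¬ s = "test") (h14 : ¬ s = "tests") (h15 : ¬ s = "testing") (h16 : ¬ s = "performance") (h17 : ¬ s = "perf") (h18 : ¬ s = "optimization") :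
    PySem.Dict.getD pvLabelPrio s 12 = 12 := by
  rw [show pvLabelPrio = PySem.Dict.mk pvLabelPrioL from by decide]
  simp [pvLabelPrioL, PySem.Dict.getD_eq_get?_getD, PySem.Dict.get?,
    Ne.symm h1, Ne.symm h2, Ne.symm h3, Ne.symm h4, Ne.symm h5, Ne.symm h6, Ne.symm h7, Ne.symm h8, Ne.symm h9, Ne.symm h10, Ne.symm h11, Ne.symm h12, Ne.symm h13, Ne.symm h14, Ne.symm h15, Ne.symm h16, Ne.symm h17, Ne.symm h18]

theorem pvGetD_eq_chainB (s : String) :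
    PySem.Dict.getD pvLabelPrio s 12 = pvChainB ("bug" == s || ("fix" == s || ("bugfix" == s || false))) ("enhancement" == s || ("feature" == s || ("enh" == s || false))) ("documentation" == s || ("docs" == s || ("doc" == s || false))) ("maintenance" == s || ("maint" == s || ("refactor" == s || false))) ("test" == s || ("tests" == s || ("testing" == s || false))) ("performance" == s || ("perf" == s || ("optimization" == s || false))) := by
  by_cases h1 : s = "bug"
  · subst h1; decide
  by_cases h2 : s = "fix"
  · subst h2; decide
  by_cases h3 : s = "bugfix"
  · subst h3; decide
  by_cases h4 : s = "enhancement"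
  · subst h4; decide
  by_cases h5 : s = "feature"
  · subst h5; decide
  by_cases h6 : s = "enh"
  · subst h6; decide
  by_cases h7 : s = "documentation"
  · subst h7; decide
  by_cases h8 : s = "docs"
  · subst h8; decide
  by_cases h9 : s = "doc"
  · subst h9; decide
  by_cases h10 : s = "maintenance"
  · subst h10; decide
  by_cases h11 : s = "maint"
  · subst h11; decide
  by_cases h12 : s = "refactor"
  · subst h12; decide
  by_cases h13 : s = "test"
  · subst h13; decide
  by_cases h14 : s = "tests"
  · subst h14; decide
  by_cases h15 : s = "testing"
  · subst h15; decide
  by_cases h16 : s = "performance"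
  · subst h16; decide
  by_cases h17 : s = "perf"
  · subst h17; decide
  by_cases h18 : s = "optimization"
  · subst h18; decide
  rw [pvLabelPrio_getD_default s h1 h2 h3 h4 h5 h6 h7 h8 h9 h10 h11 h12 h13 h14 h15 h16 h17 h18]
  simp only [show ("bug" == s) = false from beq_eq_false_iff_ne.mpr (Ne.symm h1), show ("fix" == s) = false from beq_eq_false_iff_ne.mpr (Ne.symm h2), show ("bugfix" == s) = false from beq_eq_false_iff_ne.mpr (Ne.symm h3), show ("enhancement" == s) = false from beq_eq_false_iff_ne.mpr (Ne.symm h4), show ("feature" == s) = false from beq_eq_false_iff_ne.mpr (Ne.symm h5), show ("enh" == s) = false from beq_eq_false_iff_ne.mpr (Ne.symm h6), show ("documentation" == s) = false from beq_eq_false_iff_ne.mpr (Ne.symm h7), show ("docs" == s) = false from beq_eq_false_iff_ne.mpr (Ne.symm h8), show ("doc" == s) = false from beq_eq_false_iff_ne.mpr (Ne.symm h9), show ("maintenance" == s) = false from beq_eq_false_iff_ne.mpr (Ne.symm h10), show ("maint" == s) = false from beq_eq_false_iff_ne.mpr (Ne.symm h11), show ("refactor" == s) = false from beq_eq_false_iff_ne.mpr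 (Ne.symm h12), show ("test" == s) = false from beq_eq_false_iff_ne.mpr (Ne.symm h13), show ("tests" == s) = false from beq_eq_false_iff_ne.mpr (Ne.symm h14), show ("testing" == s) = false from beq_eq_false_iff_ne.mpr (Ne.symm h15), show ("performance" == s) = false from beq_eq_false_iff_ne.mpr (Ne.symm h16), show ("perf" == s) = false from beq_eq_false_iff_ne.mpr (Ne.symm h17), show ("optimization" == s) = false from beq_eq_false_iff_ne.mpr (Ne.symm h18), Bool.or_false]
  rfl

theorem pvChain_nil : pvChain [] = 12 := by decide

theorem pvChain_cons (s : String) (L : List String) :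
    pvChain (s :: L) = min (PySem.Dict.getD pvLabelPrio s 12) (pvChain L) := by
  unfold pvChain
  simp only [List.contains_cons]
  rw [pvOrRegroup, pvOrRegroup, pvOrRegroup, pvOrRegroup, pvOrRegroup, pvOrRegroup]
  rw [pvGetD_eq_chainB s, pvChainB_min]

theorem pvFold_label (labels : List String) (acc : Int) (hacc : acc ≤ 12) :
    labels.foldl
      (fun best l =>
        let p := PySem.Dict.getD pvLabelPrio (PySem.Str.lower l) 12
        if p < best then p else best) acc
      = min acc (pvChain (labels.map PySem.Str.lower)) := by
  induction labels generalizing acc with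
  | nil => simp [pvChain_nil]; omega
  | cons l ls ih =>
    simp only [List.foldl_cons, List.map_cons, pvChain_cons]
    rw [ih]
    · have h1 := pvChain_bounds (ls.map PySem.Str.lower)
      have h2 : (if PySem.Dict.getD pvLabelPrio (PySem.Str.lower l) 12 < acc
          then PySem.Dict.getD pvLabelPrio (PySem.Str.lower l) 12 else acc)
          = min (PySem.Dict.getD pvLabelPrio (PySem.Str.lower l) 12) acc := by
        split_ifs <;> omega
      rw [h2]; omega
    · split_ifs <;> omega

set_option maxHeartbeats 1000000 in
theorem infer_function_type_spec : Claim_equal_infer_function_type := by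
  intro pr_title labels _
  unfold Spec_infer_function_type infer_function_type infer_function_type_alt
  simp only [List.any_cons, List.any_nil]
  rw [pvFold_label labels 12 (by omega)]
  rw [show min 12 (pvChain (labels.map PySem.Str.lower)) = pvChain (labels.map PySem.Str.lower) from by have := pvChain_bounds (labels.map PySem.Str.lower); omega]
  unfold pvChain pvChainB
  cases h0 : ((List.map PySem.Str.lower labels).contains "bug" || ((List.map PySem.Str.lower labels).contains "fix" || ((List.map PySem.Str.lower labels).contains "bugfix" || false))) with
  | true => simp [pvTitleKW, pvCodes, PySem.List.pyGet?, PySem.List.pyIdx?]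
  | false =>
    cases h1 : ((List.map PySem.Str.lower labels).contains "enhancement" || ((List.map PySem.Str.lower labels).contains "feature" || ((List.map PySem.Str.lower labels).contains "enh" || false))) with
    | true => simp [pvTitleKW, pvCodes, PySem.List.pyGet?, PySem.List.pyIdx?]
    | false =>
      cases h2 : ((List.map PySem.Str.lower labels).contains "documentation" || ((List.map PySem.Str.lower labels).contains "docs" || ((List.map PySem.Str.lower labels).contains "doc" || false))) with
      | true => simp [pvTitleKW, pvCodes, PySem.List.pyGet?, PySem.List.pyIdx?]
      | false =>
        cases h3 : ((List.map PySem.Str.lower labels).contains "maintenance" || ((List.map PySem.Str.lower labels).contains "maint" || ((List.map PySem.Str.lower labels).contains "refactor" || false))) with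
        | true => simp [pvTitleKW, pvCodes, PySem.List.pyGet?, PySem.List.pyIdx?]
        | false =>
          cases h4 : ((List.map PySem.Str.lower labels).contains "test" || ((List.map PySem.Str.lower labels).contains "tests" || ((List.map PySem.Str.lower labels).contains "testing" || false))) with
          | true => simp [pvTitleKW, pvCodes, PySem.List.pyGet?, PySem.List.pyIdx?]
          | false =>
            cases h5 : ((List.map PySem.Str.lower labels).contains "performance" || ((List.map PySem.Str.lower labels).contains "perf" || ((List.map PySem.Str.lower labels).contains "optimization" || false))) with
            | true => simp [pvTitleKW, pvCodes, PySem.List.pyGet?, PySem.List.pyIdx?]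
            | false =>
              by_cases hb1 : PySem.Str.isIn "fix" (PySem.Str.lower pr_title) = true
              · simp at hb1
                simp [pvTitleKW, pvCodes, PySem.List.pyGet?, PySem.List.pyIdx?, hb1]
              rw [Bool.not_eq_true] at hb1
              by_cases hb2 : PySem.Str.isIn "bug" (PySem.Str.lower pr_title) = true
              · simp at hb1 hb2
                simp [pvTitleKW, pvCodes, PySem.List.pyGet?, PySem.List.pyIdx?, hb1, hb2]
              rw [Bool.not_eq_true] at hb2
              by_cases hb3 : PySem.Str.isIn "error" (PySem.Str.lower pr_title) = true
              · simp at hb1 hb2 hb3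
                simp [pvTitleKW, pvCodes, PySem.List.pyGet?, PySem.List.pyIdx?, hb1, hb2, hb3]
              rw [Bool.not_eq_true] at hb3
              by_cases hb4 : PySem.Str.isIn "issue" (PySem.Str.lower pr_title) = true
              · simp at hb1 hb2 hb3 hb4
                simp [pvTitleKW, pvCodes, PySem.List.pyGet?, PySem.List.pyIdx?, hb1, hb2, hb3, hb4]
              rw [Bool.not_eq_true] at hb4
              by_cases hb5 : PySem.Str.isIn "add" (PySem.Str.lower pr_title) = true
              · simp at hb1 hb2 hb3 hb4 hb5
                simp [pvTitleKW, pvCodes, PySem.List.pyGet?, PySem.List.pyIdx?, hb1, hb2, hb3, hb4, hb5]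
              rw [Bool.not_eq_true] at hb5
              by_cases hb6 : PySem.Str.isIn "implement" (PySem.Str.lower pr_title) = true
              · simp at hb1 hb2 hb3 hb4 hb5 hb6
                simp [pvTitleKW, pvCodes, PySem.List.pyGet?, PySem.List.pyIdx?, hb1, hb2, hb3, hb4, hb5, hb6]
              rw [Bool.not_eq_true] at hb6
              by_cases hb7 : PySem.Str.isIn "new" (PySem.Str.lower pr_title) = true
              · simp at hb1 hb2 hb3 hb4 hb5 hb6 hb7
                simp [pvTitleKW, pvCodes, PySem.List.pyGet?, PySem.List.pyIdx?, hb1, hb2, hb3, hb4, hb5, hb6, hb7]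
              rw [Bool.not_eq_true] at hb7
              by_cases hb8 : PySem.Str.isIn "feature" (PySem.Str.lower pr_title) = true
              · simp at hb1 hb2 hb3 hb4 hb5 hb6 hb7 hb8
                simp [pvTitleKW, pvCodes, PySem.List.pyGet?, PySem.List.pyIdx?, hb1, hb2, hb3, hb4, hb5, hb6, hb7, hb8]
              rw [Bool.not_eq_true] at hb8
              by_cases hb9 : PySem.Str.isIn "doc" (PySem.Str.lower pr_title) = true
              · simp at hb1 hb2 hb3 hb4 hb5 hb6 hb7 hb8 hb9
                simp [pvTitleKW, pvCodes, PySem.List.pyGet?, PySem.List.pyIdx?, hb1, hb2, hb3, hb4, hb5, hb6, hb7, hb8, hb9]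
              rw [Bool.not_eq_true] at hb9
              by_cases hb10 : PySem.Str.isIn "documentation" (PySem.Str.lower pr_title) = true
              · simp at hb1 hb2 hb3 hb4 hb5 hb6 hb7 hb8 hb9 hb10
                simp [pvTitleKW, pvCodes, PySem.List.pyGet?, PySem.List.pyIdx?, hb1, hb2, hb3, hb4, hb5, hb6, hb7, hb8, hb9, hb10]
              rw [Bool.not_eq_true] at hb10
              by_cases hb11 : PySem.Str.isIn "readme" (PySem.Str.lower pr_title) = true
              · simp at hb1 hb2 hb3 hb4 hb5 hb6 hb7 hb8 hb9 hb10 hb11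
                simp [pvTitleKW, pvCodes, PySem.List.pyGet?, PySem.List.pyIdx?, hb1, hb2, hb3, hb4, hb5, hb6, hb7, hb8, hb9, hb10, hb11]
              rw [Bool.not_eq_true] at hb11
              by_cases hb12 : PySem.Str.isIn "refactor" (PySem.Str.lower pr_title) = true
              · simp at hb1 hb2 hb3 hb4 hb5 hb6 hb7 hb8 hb9 hb10 hb11 hb12
                simp [pvTitleKW, pvCodes, PySem.List.pyGet?, PySem.List.pyIdx?, hb1, hb2, hb3, hb4, hb5, hb6, hb7, hb8, hb9, hb10, hb11, hb12]
              rw [Bool.not_eq_true] at hb12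
              by_cases hb13 : PySem.Str.isIn "cleanup" (PySem.Str.lower pr_title) = true
              · simp at hb1 hb2 hb3 hb4 hb5 hb6 hb7 hb8 hb9 hb10 hb11 hb12 hb13
                simp [pvTitleKW, pvCodes, PySem.List.pyGet?, PySem.List.pyIdx?, hb1, hb2, hb3, hb4, hb5, hb6, hb7, hb8, hb9, hb10, hb11, hb12, hb13]
              rw [Bool.not_eq_true] at hb13
              by_cases hb14 : PySem.Str.isIn "maintain" (PySem.Str.lower pr_title) = true
              · simp at hb1 hb2 hb3 hb4 hb5 hb6 hb7 hb8 hb9 hb10 hb11 hb12 hb13 hb14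
                simp [pvTitleKW, pvCodes, PySem.List.pyGet?, PySem.List.pyIdx?, hb1, hb2, hb3, hb4, hb5, hb6, hb7, hb8, hb9, hb10, hb11, hb12, hb13, hb14]
              rw [Bool.not_eq_true] at hb14
              by_cases hb15 : PySem.Str.isIn "test" (PySem.Str.lower pr_title) = true
              · simp at hb1 hb2 hb3 hb4 hb5 hb6 hb7 hb8 hb9 hb10 hb11 hb12 hb13 hb14 hb15
                simp [pvTitleKW, pvCodes, PySem.List.pyGet?, PySem.List.pyIdx?, hb1, hb2, hb3, hb4, hb5, hb6, hb7, hb8, hb9, hb10, hb11, hb12, hb13, hb14, hb15]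
              rw [Bool.not_eq_true] at hb15
              by_cases hb16 : PySem.Str.isIn "testing" (PySem.Str.lower pr_title) = true
              · simp at hb1 hb2 hb3 hb4 hb5 hb6 hb7 hb8 hb9 hb10 hb11 hb12 hb13 hb14 hb15 hb16
                simp [pvTitleKW, pvCodes, PySem.List.pyGet?, PySem.List.pyIdx?, hb1, hb2, hb3, hb4, hb5, hb6, hb7, hb8, hb9, hb10, hb11, hb12, hb13, hb14, hb15, hb16]
              rw [Bool.not_eq_true] at hb16
              by_cases hb17 : PySem.Str.isIn "optimize" (PySem.Str.lower pr_title) = true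
              · simp at hb1 hb2 hb3 hb4 hb5 hb6 hb7 hb8 hb9 hb10 hb11 hb12 hb13 hb14 hb15 hb16 hb17
                simp [pvTitleKW, pvCodes, PySem.List.pyGet?, PySem.List.pyIdx?, hb1, hb2, hb3, hb4, hb5, hb6, hb7, hb8, hb9, hb10, hb11, hb12, hb13, hb14, hb15, hb16, hb17]
              rw [Bool.not_eq_true] at hb17
              by_cases hb18 : PySem.Str.isIn "performance" (PySem.Str.lower pr_title) = true
              · simp at hb1 hb2 hb3 hb4 hb5 hb6 hb7 hb8 hb9 hb10 hb11 hb12 hb13 hb14 hb15 hb16 hb17 hb18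
                simp [pvTitleKW, pvCodes, PySem.List.pyGet?, PySem.List.pyIdx?, hb1, hb2, hb3, hb4, hb5, hb6, hb7, hb8, hb9, hb10, hb11, hb12, hb13, hb14, hb15, hb16, hb17, hb18]
              rw [Bool.not_eq_true] at hb18
              by_cases hb19 : PySem.Str.isIn "speed" (PySem.Str.lower pr_title) = true
              · simp at hb1 hb2 hb3 hb4 hb5 hb6 hb7 hb8 hb9 hb10 hb11 hb12 hb13 hb14 hb15 hb16 hb17 hb18 hb19
                simp [pvTitleKW, pvCodes, PySem.List.pyGet?, PySem.List.pyIdx?, hb1, hb2, hb3, hb4, hb5, hb6, hb7, hb8, hb9, hb10, hb11, hb12, hb13, hb14, hb15, hb16, hb17, hb18, hb19]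
              rw [Bool.not_eq_true] at hb19
              simp at hb1 hb2 hb3 hb4 hb5 hb6 hb7 hb8 hb9 hb10 hb11 hb12 hb13 hb14 hb15 hb16 hb17 hb18 hb19
              simp [pvTitleKW, pvCodes, PySem.List.pyGet?, PySem.List.pyIdx?, hb1, hb2, hb3, hb4, hb5, hb6, hb7, hb8, hb9, hb10, hb11, hb12, hb13, hb14, hb15, hb16, hb17, hb18, hb19]
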